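-- pv_equiv track=rewrite | github.com/a2006ly/sys-programming | Q3.py | calc7
-- ===== SOURCE A (Python) =====
-- def calc7(numbers):
--     sum = 0
--     i = 0
--     double = False
--     n = len(numbers)
--     if n == 0: return -1
--     while i < n:
--         sum += numbers[i]
--         if double:
--             sum += numbers[i]
--             double = False
--         if numbers[i] == 7: double = True
--         i += 1
--     return sum
-- ===== SOURCE B (Python) =====
-- def calc7(numbers):
--     if not numbers:
--         return -1
--     # stage 1: plain sum of all elements
--     total = sum(numbers)
--     # stage 2: add again every element that directly follows a 7
--     for i in range(len(numbers) - 1):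
--         if numbers[i] == 7:
--             total += numbers[i + 1]
--     return total
-- ===== Notes on version B (the rewrite author's own statement) =====
-- stated objective: alternative
-- what changed: Replaced A's single stateful pass carrying a 'double' flag by two staged passes: first a plain sum of all elements, then a second pass that adds once more each element whose predecessor is 7 (valid because integer addition is commutative).
import Mathlib
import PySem

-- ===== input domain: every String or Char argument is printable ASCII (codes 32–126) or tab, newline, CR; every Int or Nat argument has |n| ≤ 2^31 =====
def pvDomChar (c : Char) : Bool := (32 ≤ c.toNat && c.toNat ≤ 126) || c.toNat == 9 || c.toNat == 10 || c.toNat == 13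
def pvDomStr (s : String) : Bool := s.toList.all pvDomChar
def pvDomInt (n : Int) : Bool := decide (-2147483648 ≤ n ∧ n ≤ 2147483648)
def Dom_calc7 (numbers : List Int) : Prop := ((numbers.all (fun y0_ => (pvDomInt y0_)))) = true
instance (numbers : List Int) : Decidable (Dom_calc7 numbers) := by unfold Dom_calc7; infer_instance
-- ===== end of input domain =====

-- B replaces A's single stateful pass (a carried 'double' flag) by two staged passes:
-- a plain sum, then a second pass adding again each element whose predecessor is 7.

-- ===== PORT A =====
-- A's while loop, state (sum, double), one step per element
def calc7Loop : List Int → Int → Bool → Int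
  | [], s, _ => s
  | x :: xs, s, d =>
      calc7Loop xs ((s + x) + (if d then x else 0)) (x == 7)

def calc7 (numbers : List Int) : Int :=
  if numbers.length == 0 then -1
  else calc7Loop numbers 0 false

-- ===== PORT B =====
def calc7_alt (numbers : List Int) : Int :=
  if numbers.isEmpty then -1
  else
    -- total = sum(numbers)
    let total := numbers.foldl (· + ·) 0
    -- for i in range(len(numbers) - 1): if numbers[i] == 7: total += numbers[i+1]
    (PySem.List.pyRange 0 ((numbers.length : Int) - 1) 1).foldl
      (fun t i =>
        if PySem.List.pyGetD numbers i 0 == 7 then t + PySem.List.pyGetD numbers (i + 1) 0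
        else t) total

-- ===== PRECONDITION & SPEC =====
def Spec_calc7 (numbers : List Int) (out : Int) : Prop := out = calc7_alt numbers
instance (numbers : List Int) (out : Int) : Decidable (Spec_calc7 numbers out) := by unfold Spec_calc7; infer_instance

-- ===== CLAIM (what is proved, stated in full; the proofs are below) =====
def Claim_equal_calc7 : Prop := ∀ (numbers : List Int), Dom_calc7 numbers → Spec_calc7 numbers (calc7 numbers)

-- ===== LEMMAS AND PROOFS =====
-- the extra amount B's second pass adds: every element directly after a 7
def bonus7 : List Int → Int
  | [] => 0
  | x :: xs => (if x = 7 then xs.headD 0 else 0) + bonus7 xs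

theorem foldl_add_eq_sum (xs : List Int) (s : Int) : xs.foldl (· + ·) s = s + xs.sum := by
  induction xs generalizing s with
  | nil => simp
  | cons x xs ih => simp [List.foldl_cons, ih]; ring

-- characterisation of A's loop
theorem calc7Loop_eq (xs : List Int) (s : Int) (d : Bool) :
    calc7Loop xs s d = s + (if d then xs.headD 0 else 0) + xs.sum + bonus7 xs := by
  induction xs generalizing s d with
  | nil => simp [calc7Loop, bonus7]
  | cons x xs ih =>
      simp only [calc7Loop, ih, bonus7, List.sum_cons, List.headD_cons]
      by_cases hx : x = 7 <;> cases d <;> (simp [hx]; ring)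

-- B's second pass over Nat indices computes bonus7
theorem range_fold_eq_bonus (xs : List Int) (t : Int) :
    (List.range (xs.length - 1)).foldl
      (fun t k => if xs.getD k 0 == 7 then t + xs.getD (k + 1) 0 else t) t
      = t + bonus7 xs := by
  induction xs generalizing t with
  | nil => simp [bonus7]
  | cons x ys ih =>
      cases ys with
      | nil => simp [bonus7]
      | cons y zs =>
          have hlen : (x :: y :: zs).length - 1 = (y :: zs).length := by simp
          rw [hlen, List.length_cons, List.range_succ_eq_map, List.foldl_cons, List.foldl_map]
          have : ∀ (t : Int),
              (List.range zs.length).foldl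
                (fun t k => if (x :: y :: zs).getD (k + 1) 0 == 7 then
                    t + (x :: y :: zs).getD (k + 1 + 1) 0 else t) t
              = (List.range ((y :: zs).length - 1)).foldl
                (fun t k => if (y :: zs).getD k 0 == 7 then t + (y :: zs).getD (k + 1) 0 else t) t := by
            intro t
            simp
          rw [this, ih]
          simp only [bonus7, List.headD_cons, List.getD]
          by_cases hx : x = 7 <;> simp [hx] <;> ring_nf
      
-- B's fold over the Int range, reduced to the Nat-range fold above
theorem altFold (xs : List Int) (t : Int) :
    (PySem.List.pyRange 0 ((xs.length : Int) - 1) 1).foldl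
      (fun t i =>
        if PySem.List.pyGetD xs i 0 == 7 then t + PySem.List.pyGetD xs (i + 1) 0 else t) t
      = t + bonus7 xs := by
  rw [PySem.List.pyRange_one, List.foldl_map]
  have h : (((xs.length : Int) - 1 - 0).toNat) = xs.length - 1 := by simp
  rw [h]
  have hfun : ∀ (t : Int) (k : Nat),
      (if PySem.List.pyGetD xs ((0 : Int) + k) 0 == 7 then
         t + PySem.List.pyGetD xs ((0 : Int) + k + 1) 0 else t)
      = (if xs.getD k 0 == 7 then t + xs.getD (k + 1) 0 else t) := by
    intro t k
    have h1 : (0 : Int) + (k : Int) = ((k : Nat) : Int) := by ring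
    have h2 : ((k : Int)) + 1 = (((k + 1 : Nat)) : Int) := by push_cast; ring
    rw [h1, h2, PySem.List.pyGetD_natCast, PySem.List.pyGetD_natCast]
  simp only [zero_add] at hfun ⊢
  simp only [hfun]
  exact range_fold_eq_bonus xs t

-- ===== VERDICT (by name: the statement is the Claim_ definition above) =====
theorem calc7_spec : Claim_equal_calc7 := by
  intro numbers _
  unfold Spec_calc7
  cases numbers with
  | nil => rfl
  | cons x xs =>
      have hA : calc7 (x :: xs) = (x :: xs).sum + bonus7 (x :: xs) := by
        simp [calc7, calc7Loop_eq]
      have hB : calc7_alt (x :: xs) = (x :: xs).foldl (· + ·) 0 + bonus7 (x :: xs) := by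
        show (PySem.List.pyRange 0 (((x :: xs).length : Int) - 1) 1).foldl
            (fun t i =>
              if PySem.List.pyGetD (x :: xs) i 0 == 7 then
                t + PySem.List.pyGetD (x :: xs) (i + 1) 0 else t)
            ((x :: xs).foldl (· + ·) 0) = _
        rw [altFold]
      rw [hA, hB, foldl_add_eq_sum]
      ring
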